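-- pv_equiv track=rewrite | github.com/mbh038/PE | mylib/fishi binomial/pascal_triangle_row.py | pascal_triangle_row
-- ===== SOURCE A (Python) =====
-- def pascal_triangle_row(n,mod):
--     # initialize necessary space for row 'n'
--     pascal = [0]*(n+1)
--     pascal[0] = 1
--
--     for i in range(1,n+1):
--         # initialize auxiliary array
--         tmp = [0]*(n+1)
--         tmp[0] = 1
--
--         for j in range(1,i+1):
--             # calculate current value based on neighbor values from previous row in triangle
--             tmp[j] = (pascal[j] + pascal[j-1])%mod
--
--         pascal = tmp
--
--     return pascal
-- ===== SOURCE B (Python) =====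
-- def pascal_triangle_row(n, mod):
--     # one multiplicative pass: C(n,k) = C(n,k-1)*(n-k+1)//k, reduced per element
--     row = [1]
--     c = 1
--     for k in range(1, n + 1):
--         c = c * (n - k + 1) // k
--         row.append(c % mod)
--     return row
-- ===== Notes on version B (the rewrite author's own statement) =====
-- stated objective: faster
-- what changed: Replaces the nested additive Pascal-triangle construction (a fresh auxiliary row rebuilt element-by-element per outer iteration) with a single multiplicative pass using C(n,k) = C(n,k-1)*(n-k+1)//k, reducing each element mod `mod` as it is appended.
import Mathlib
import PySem

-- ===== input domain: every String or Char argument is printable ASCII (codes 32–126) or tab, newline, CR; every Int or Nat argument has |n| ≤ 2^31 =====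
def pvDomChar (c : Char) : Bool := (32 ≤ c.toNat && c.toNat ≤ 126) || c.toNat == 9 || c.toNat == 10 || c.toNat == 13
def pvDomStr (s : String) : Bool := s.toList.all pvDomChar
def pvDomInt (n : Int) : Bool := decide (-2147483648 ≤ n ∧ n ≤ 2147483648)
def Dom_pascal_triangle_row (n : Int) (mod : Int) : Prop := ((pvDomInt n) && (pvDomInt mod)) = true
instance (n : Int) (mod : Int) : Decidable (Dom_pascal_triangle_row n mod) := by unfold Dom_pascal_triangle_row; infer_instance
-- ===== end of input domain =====

-- B replaces A's O(n^2) nested additive Pascal-triangle construction by a single multiplicative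
-- pass using C(n,k) = C(n,k-1)*(n-k+1)//k, reducing each element mod `mod` (measured faster).

-- ===== PORT A =====
def pascal_triangle_row (n : Int) (mod : Int) : List Int :=
  -- pascal = [0]*(n+1); pascal[0] = 1
  let pascal : List Int := PySem.List.pySetD (PySem.List.pyRepeat [(0 : Int)] (n + 1)) 0 1
  -- for i in range(1, n+1): build tmp from pascal, then pascal = tmp
  (PySem.List.pyRange 1 (n + 1) 1).foldl (fun pascal i =>
    let tmp : List Int := PySem.List.pySetD (PySem.List.pyRepeat [(0 : Int)] (n + 1)) 0 1
    (PySem.List.pyRange 1 (i + 1) 1).foldl (fun tmp j =>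
      PySem.List.pySetD tmp j
        (PySem.Int.mod (PySem.List.pyGetD pascal j 0 + PySem.List.pyGetD pascal (j - 1) 0) mod))
      tmp)
    pascal

-- ===== PORT B =====
def pascal_triangle_row_alt (n : Int) (mod : Int) : List Int :=
  -- row = [1]; c = 1; for k in range(1, n+1): c = c*(n-k+1)//k; row.append(c % mod)
  let st : List Int × Int :=
    (PySem.List.pyRange 1 (n + 1) 1).foldl (fun (st : List Int × Int) k =>
      let c := PySem.Int.floordiv (st.2 * (n - k + 1)) k
      (st.1 ++ [PySem.Int.mod c mod], c)) ([1], 1)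
  st.1

-- ===== PRECONDITION & SPEC =====
-- Pre_ excludes exactly the inputs where A raises: n < 0 (IndexError on pascal[0])
-- and mod = 0 with n ≥ 1 (ZeroDivisionError in the inner % mod).
def Pre_pascal_triangle_row (n : Int) (mod : Int) : Prop := 0 ≤ n ∧ (mod ≠ 0 ∨ n = 0)
instance (n : Int) (mod : Int) : Decidable (Pre_pascal_triangle_row n mod) := by
  unfold Pre_pascal_triangle_row; infer_instance
def pvWitness_pascal_triangle_row : Int × Int := (5, 7)

def Spec_pascal_triangle_row (n : Int) (mod : Int) (out : List Int) : Prop :=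
  out = pascal_triangle_row_alt n mod
instance (n : Int) (mod : Int) (out : List Int) : Decidable (Spec_pascal_triangle_row n mod out) := by
  unfold Spec_pascal_triangle_row; infer_instance

-- ===== CLAIM (what is proved, stated in full; the proofs are below) =====
def Claim_equal_pascal_triangle_row : Prop := ∀ (n : Int) (mod : Int), Dom_pascal_triangle_row n mod → Pre_pascal_triangle_row n mod → Spec_pascal_triangle_row n mod (pascal_triangle_row n mod)

-- ===== LEMMAS AND PROOFS =====

theorem pv_mod_eq_fmod (a b : Int) : PySem.Int.mod a b = Int.fmod a b := rfl

theorem pv_fmod_add_left (a b m : Int) :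
    Int.fmod (Int.fmod a m + b) m = Int.fmod (a + b) m := by
  rw [Int.fmod_def a m]
  have h : a - m * a.fdiv m + b = (a + b) + m * (-a.fdiv m) := by ring
  rw [h, Int.add_mul_fmod_self_left]

-- the value at index j of row i of the (mod-reduced) triangle
def pvRowFn (m : Int) (i j : Nat) : Int :=
  if j = 0 then 1 else Int.fmod ((Nat.choose i j : Nat) : Int) m

def pvRowA (m : Int) (N i : Nat) : List Int := (List.range (N + 1)).map (pvRowFn m i)

theorem pv_set_map_range {α : Type} (f : Nat → α) (L k : Nat) (v : α) :
    ((List.range L).map f).set k v =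
      (List.range L).map (fun j => if j = k then v else f j) := by
  apply List.ext_getElem
  · simp
  · intro i h1 h2
    simp only [List.getElem_set, List.getElem_map, List.getElem_range]
    by_cases hik : k = i
    · subst hik
      simp
    · simp [hik, Ne.symm hik]

-- A's initial row equals the triangle's row 0
theorem pv_init_row (m : Int) (N : Nat) :
    PySem.List.pySetD (PySem.List.pyRepeat [(0 : Int)] ((N : Int) + 1)) 0 1 = pvRowA m N 0 := by
  have h1 : PySem.List.pyRepeat [(0 : Int)] ((N : Int) + 1) = List.replicate (N + 1) (0 : Int) := by
    rw [PySem.List.pyRepeat_singleton]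
    have h0 : (((N : Int) + 1)).toNat = N + 1 := by omega
    rw [h0]
  rw [h1]
  have h2 : PySem.List.pySetD (List.replicate (N + 1) (0 : Int)) 0 1
      = (List.replicate (N + 1) (0 : Int)).set 0 1 := by
    simpa using PySem.List.pySetD_natCast (xs := List.replicate (N + 1) (0 : Int)) (n := 0) (v := 1)
  rw [h2]
  apply List.ext_getElem
  · simp [pvRowA]
  · intro i hi1 hi2
    simp only [List.length_set, List.length_replicate] at hi1
    simp only [pvRowA, List.getElem_set, List.getElem_replicate, List.getElem_map,
      List.getElem_range, pvRowFn]
    by_cases hi : i = 0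
    · subst hi; simp
    · simp [hi, Ne.symm hi, Nat.choose_eq_zero_of_lt (by omega : (0:Nat) < i), Int.zero_fmod]

theorem pv_rowA_getD (m : Int) (N i j : Nat) (hj : j ≤ N) :
    (pvRowA m N i).getD j 0 = pvRowFn m i j := by
  unfold pvRowA
  rw [List.getD_eq_getElem _ _ (by simp; omega)]
  simp

-- the inner loop of A: one row-update step
theorem pv_inner (m : Int) (hm : m ≠ 0) (N i : Nat) (hi : 1 ≤ i) (hiN : i ≤ N) (t : Nat)
    (ht : t ≤ i) :
    (PySem.List.pyRange 1 ((t : Int) + 1) 1).foldl (fun tmp j =>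
        PySem.List.pySetD tmp j
          (PySem.Int.mod (PySem.List.pyGetD (pvRowA m N (i - 1)) j 0 +
            PySem.List.pyGetD (pvRowA m N (i - 1)) (j - 1) 0) m))
        (pvRowA m N 0) =
      (List.range (N + 1)).map (fun j =>
        if j = 0 then 1 else if j ≤ t then Int.fmod ((Nat.choose i j : Nat) : Int) m else 0) := by
  induction t with
  | zero =>
    rw [PySem.List.pyRange_one_eq_nil (by norm_num)]
    simp only [List.foldl_nil, pvRowA]
    apply List.map_congr_left
    intro j hj
    simp only [pvRowFn]
    by_cases hj0 : j = 0
    · simp [hj0]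
    · simp [hj0, Nat.choose_eq_zero_of_lt (by omega : (0:Nat) < j), Int.zero_fmod]
  | succ t ih =>
    have hrange : PySem.List.pyRange 1 ((↑(t + 1) : Int) + 1) 1
        = PySem.List.pyRange 1 ((t : Int) + 1) 1 ++ [(t : Int) + 1] := by
      have := PySem.List.pyRange_one_succ_right (a := 1) (b := (t : Int) + 1) (by omega)
      push_cast
      rw [this]
    rw [hrange, List.foldl_append, ih (by omega)]
    simp only [List.foldl_cons, List.foldl_nil]
    -- the two reads from the previous row
    have hga : PySem.List.pyGetD (pvRowA m N (i - 1)) ((t : Int) + 1) 0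
        = pvRowFn m (i - 1) (t + 1) := by
      have hc : ((t : Int) + 1) = ((t + 1 : Nat) : Int) := by push_cast; ring
      rw [hc, PySem.List.pyGetD_natCast, pv_rowA_getD m N (i - 1) (t + 1) (by omega)]
    have hgb : PySem.List.pyGetD (pvRowA m N (i - 1)) ((t : Int) + 1 - 1) 0
        = pvRowFn m (i - 1) t := by
      have hc : ((t : Int) + 1 - 1) = ((t : Nat) : Int) := by ring
      rw [hc, PySem.List.pyGetD_natCast, pv_rowA_getD m N (i - 1) t (by omega)]
    rw [hga, hgb]
    -- the written value is row i at index t+1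
    have hval : PySem.Int.mod (pvRowFn m (i - 1) (t + 1) + pvRowFn m (i - 1) t) m
        = Int.fmod ((Nat.choose i (t + 1) : Nat) : Int) m := by
      rw [pv_mod_eq_fmod]
      have hpascal : (Nat.choose i (t + 1) : Int)
          = (Nat.choose (i - 1) (t + 1) : Int) + (Nat.choose (i - 1) t : Int) := by
        have h1 : i = (i - 1) + 1 := by omega
        rw [h1, Nat.choose_succ_succ']
        push_cast
        ring
      simp only [pvRowFn]
      by_cases ht0 : t = 0
      · subst ht0
        simp only [if_neg (by omega : ¬ (1 = 0))]
        rw [pv_fmod_add_left, hpascal]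
        norm_num
      · simp only [if_neg (by omega : ¬ (t + 1 = 0)), if_neg ht0]
        rw [pv_fmod_add_left]
        have h2 : ((Nat.choose (i - 1) (t + 1) : Nat) : Int) + Int.fmod ((Nat.choose (i - 1) t : Nat) : Int) m
            = Int.fmod ((Nat.choose (i - 1) t : Nat) : Int) m + ((Nat.choose (i - 1) (t + 1) : Nat) : Int) := by ring
        rw [h2, pv_fmod_add_left, hpascal]
        ring_nf
    -- the write at index t+1
    have hset : PySem.List.pySetD
        ((List.range (N + 1)).map (fun j =>
          if j = 0 then 1 else if j ≤ t then Int.fmod ((Nat.choose i j : Nat) : Int) m else 0))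
        ((t : Int) + 1)
        (PySem.Int.mod (pvRowFn m (i - 1) (t + 1) + pvRowFn m (i - 1) t) m)
        = ((List.range (N + 1)).map (fun j =>
          if j = 0 then 1 else if j ≤ t then Int.fmod ((Nat.choose i j : Nat) : Int) m else 0)).set
            (t + 1) (Int.fmod ((Nat.choose i (t + 1) : Nat) : Int) m) := by
      have hc : ((t : Int) + 1) = ((t + 1 : Nat) : Int) := by push_cast; ring
      rw [hval, hc]
      simpa using PySem.List.pySetD_natCast
        (xs := (List.range (N + 1)).map (fun j =>
          if j = 0 then 1 else if j ≤ t then Int.fmod ((Nat.choose i j : Nat) : Int) m else 0))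
        (n := t + 1) (v := Int.fmod ((Nat.choose i (t + 1) : Nat) : Int) m)
    rw [hset, pv_set_map_range]
    apply List.map_congr_left
    intro j hj
    by_cases hjt : j = t + 1
    · subst hjt; simp
    · by_cases hj0 : j = 0
      · simp [hj0]
      · have : (j ≤ t + 1) ↔ (j ≤ t) := by omega
        simp [hjt, hj0, this]

-- the full inner loop turns row (i-1) into row i
theorem pv_inner_full (m : Int) (hm : m ≠ 0) (N i : Nat) (hi : 1 ≤ i) (hiN : i ≤ N) :
    (PySem.List.pyRange 1 ((i : Int) + 1) 1).foldl (fun tmp j =>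
        PySem.List.pySetD tmp j
          (PySem.Int.mod (PySem.List.pyGetD (pvRowA m N (i - 1)) j 0 +
            PySem.List.pyGetD (pvRowA m N (i - 1)) (j - 1) 0) m))
        (pvRowA m N 0) = pvRowA m N i := by
  rw [pv_inner m hm N i hi hiN i le_rfl]
  apply List.map_congr_left
  intro j hj
  simp only [pvRowFn, List.mem_range] at *
  by_cases hj0 : j = 0
  · simp [hj0]
  · by_cases hji : j ≤ i
    · simp [hj0, hji]
    · simp [hj0, hji, Nat.choose_eq_zero_of_lt (by omega : i < j), Int.zero_fmod]

-- A's outer loop up to i produces row i (the inner init written as in A)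
theorem pv_outer (m : Int) (N : Nat) (hm : m ≠ 0 ∨ N = 0) (i : Nat) (hiN : i ≤ N) :
    (PySem.List.pyRange 1 ((i : Int) + 1) 1).foldl (fun pascal i =>
        (PySem.List.pyRange 1 (i + 1) 1).foldl (fun tmp j =>
          PySem.List.pySetD tmp j
            (PySem.Int.mod (PySem.List.pyGetD pascal j 0 + PySem.List.pyGetD pascal (j - 1) 0) m))
          (PySem.List.pySetD (PySem.List.pyRepeat [(0 : Int)] ((N : Int) + 1)) 0 1))
      (PySem.List.pySetD (PySem.List.pyRepeat [(0 : Int)] ((N : Int) + 1)) 0 1)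
      = pvRowA m N i := by
  induction i with
  | zero =>
    rw [PySem.List.pyRange_one_eq_nil (by omega)]
    rw [List.foldl_nil]
    exact pv_init_row m N
  | succ i ih =>
    have hm' : m ≠ 0 := by
      rcases hm with h | h
      · exact h
      · omega
    have hrange : PySem.List.pyRange 1 ((↑(i + 1) : Int) + 1) 1
        = PySem.List.pyRange 1 ((i : Int) + 1) 1 ++ [(i : Int) + 1] := by
      have := PySem.List.pyRange_one_succ_right (a := 1) (b := (i : Int) + 1) (by omega)
      push_cast
      rw [this]
    rw [hrange, List.foldl_append, ih (by omega)]
    simp only [List.foldl_cons, List.foldl_nil]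
    rw [pv_init_row m N]
    have h1 : (i + 1) - 1 = i := by omega
    have h2 := pv_inner_full m hm' N (i + 1) (by omega) hiN
    rw [h1] at h2
    convert h2 using 2

-- B's loop up to k produces the first k+1 entries of row N and the exact binomial C(N,k)
theorem pv_alt_loop (m : Int) (N : Nat) (k : Nat) (hk : k ≤ N) :
    (PySem.List.pyRange 1 ((k : Int) + 1) 1).foldl (fun (st : List Int × Int) j =>
        let c := PySem.Int.floordiv (st.2 * ((N : Int) - j + 1)) j
        (st.1 ++ [PySem.Int.mod c m], c)) ([1], 1)
      = ((List.range (k + 1)).map (pvRowFn m N), ((Nat.choose N k : Nat) : Int)) := by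
  induction k with
  | zero =>
    rw [PySem.List.pyRange_one_eq_nil (by norm_num)]
    simp [pvRowFn, List.range_succ]
  | succ k ih =>
    have hrange : PySem.List.pyRange 1 ((↑(k + 1) : Int) + 1) 1
        = PySem.List.pyRange 1 ((k : Int) + 1) 1 ++ [(k : Int) + 1] := by
      have := PySem.List.pyRange_one_succ_right (a := 1) (b := (k : Int) + 1) (by omega)
      push_cast
      rw [this]
    rw [hrange, List.foldl_append, ih (by omega)]
    simp only [List.foldl_cons, List.foldl_nil]
    have hc : PySem.Int.floordiv (((Nat.choose N k : Nat) : Int) * ((N : Int) - ((k : Int) + 1) + 1)) ((k : Int) + 1)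
        = ((Nat.choose N (k + 1) : Nat) : Int) := by
      have h1 : (N : Int) - ((k : Int) + 1) + 1 = ((N - k : Nat) : Int) := by
        have : k ≤ N := by omega
        push_cast [this]
        ring
      rw [h1]
      have h2 : ((Nat.choose N k : Nat) : Int) * ((N - k : Nat) : Int)
          = ((Nat.choose N k * (N - k) : Nat) : Int) := by push_cast; ring
      rw [h2]
      have h3 : ((k : Int) + 1) = ((k + 1 : Nat) : Int) := by push_cast; ring
      rw [h3]
      rw [PySem.Int.floordiv_natCast]
      congr 1
      rw [← Nat.choose_succ_right_eq, Nat.mul_div_cancel _ (by omega)]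
    rw [hc]
    have hlast : PySem.Int.mod ((Nat.choose N (k + 1) : Nat) : Int) m = pvRowFn m N (k + 1) := by
      simp [pvRowFn, pv_mod_eq_fmod]
    rw [hlast]
    congr 1
    conv_rhs => rw [List.range_succ, List.map_append]
    rfl

theorem pv_alt_eq (m : Int) (N : Nat) :
    pascal_triangle_row_alt (N : Int) m = pvRowA m N N := by
  simp only [pascal_triangle_row_alt]
  rw [pv_alt_loop m N N le_rfl]
  rfl

theorem pv_a_eq (m : Int) (N : Nat) (hm : m ≠ 0 ∨ N = 0) :
    pascal_triangle_row (N : Int) m = pvRowA m N N := by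
  simp only [pascal_triangle_row]
  exact pv_outer m N hm N le_rfl

-- ===== VERDICT (by name: the statement is the Claim_ definition above) =====
theorem pascal_triangle_row_spec : Claim_equal_pascal_triangle_row := by
  intro n m _hdom hpre
  unfold Spec_pascal_triangle_row
  obtain ⟨hn, hm⟩ := hpre
  obtain ⟨N, rfl⟩ : ∃ N : Nat, n = (N : Int) := ⟨n.toNat, (Int.toNat_of_nonneg hn).symm⟩
  have hm' : m ≠ 0 ∨ N = 0 := by
    rcases hm with h | h
    · exact Or.inl h
    · right; omega
  rw [pv_a_eq m N hm', pv_alt_eq m N]
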